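-- pv_equiv track=rewrite | github.com/fchapoton/demcompare | dem_compare_lib/stats.py | get_sets_labels_and_names
-- ===== SOURCE A (Python) =====
-- def get_sets_labels_and_names(class_type, class_rad_range):
--     """
--     Get sets' labels and sets' names
--
--     :param class_type: 'slope' or 'user'
--     :param class_rad_range: list defining class ranges such as [0 10 25 100]
--     :return sets labels and names
--     """
--
--     sets_label_list = []
--     sets_name_list = []
--
--     for i in range(0, len(class_rad_range)):
--         if i == len(class_rad_range) - 1:
--             if class_type == 'slope':
--                 sets_label_list.append(r'$\nabla$ > {}%'.format(class_rad_range[i]))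
--             else:
--                 sets_label_list.append('val > {}%'.format(class_rad_range[i]))
--             sets_name_list.append('[{}; inf['.format(class_rad_range[i]))
--         else:
--             if class_type == 'slope':
--                 sets_label_list.append(r'$\nabla \in$ [{}% ; {}%]'.format(class_rad_range[i], class_rad_range[i + 1]))
--             else:
--                 sets_label_list.append(r'val $\in$ [{}% ; {}%]'.format(class_rad_range[i], class_rad_range[i + 1]))
--             sets_name_list.append('[{}; {}]'.format(class_rad_range[i], class_rad_range[i + 1]))
--
--     return sets_label_list, sets_name_list
-- ===== SOURCE B (Python) =====
-- def get_sets_labels_and_names(class_type, class_rad_range):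
--     """Backward single pass: walk the bounds right-to-left carrying the previous
--     (righter) bound; the first visited bound yields the open-ended 'inf' entry,
--     every later one a bounded entry; the lists are built back-to-front and
--     reversed once at the end."""
--     slope = class_type == 'slope'
--     labels, names, prev = [], [], None
--     for a in reversed(class_rad_range):
--         if prev is None:
--             labels.append(r'$\nabla$ > {}%'.format(a) if slope else 'val > {}%'.format(a))
--             names.append('[{}; inf['.format(a))
--         else:
--             labels.append((r'$\nabla \in$ [{}% ; {}%]' if slope
--                            else r'val $\in$ [{}% ; {}%]').format(a, prev))
--             names.append('[{}; {}]'.format(a, prev))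
--         prev = a
--     labels.reverse()
--     names.reverse()
--     return labels, names
-- ===== Notes on version B (the rewrite author's own statement) =====
-- stated objective: alternative
-- what changed: Instead of A's forward indexed loop with a per-iteration last-index test and xs[i]/xs[i+1] lookups, B walks the bounds right-to-left carrying the previous bound in an accumulator (the open-ended entry is emitted first, no index arithmetic), building both lists back-to-front and reversing them once at the end.
import Mathlib
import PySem

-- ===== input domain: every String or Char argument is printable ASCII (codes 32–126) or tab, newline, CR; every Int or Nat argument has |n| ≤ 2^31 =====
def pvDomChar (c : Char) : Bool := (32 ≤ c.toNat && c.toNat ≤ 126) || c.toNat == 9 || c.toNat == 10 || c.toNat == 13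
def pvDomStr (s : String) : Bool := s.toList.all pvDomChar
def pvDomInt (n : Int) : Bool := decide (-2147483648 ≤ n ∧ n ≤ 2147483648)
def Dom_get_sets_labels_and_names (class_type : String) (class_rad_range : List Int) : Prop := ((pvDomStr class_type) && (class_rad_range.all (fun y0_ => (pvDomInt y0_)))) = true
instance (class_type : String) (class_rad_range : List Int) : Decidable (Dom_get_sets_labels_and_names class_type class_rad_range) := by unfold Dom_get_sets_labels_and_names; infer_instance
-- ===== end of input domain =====

-- B replaces A's forward indexed loop with its per-iteration last-index test by a right-to-left
-- pass carrying the previous bound (open-ended entry emitted first, lists built back-to-front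
-- and reversed once); objective: alternative decomposition, return values proved equal.

-- ===== PORT A =====
-- literal port of A: indexed loop over range(len), appending to two lists,
-- testing 'i == len - 1' each iteration; xs[i] as pyGetD (index provably in range).
def get_sets_labels_and_names (class_type : String) (class_rad_range : List Int) : List String × List String :=
  (PySem.List.pyRange 0 (PySem.List.len class_rad_range) 1).foldl
    (fun acc i =>
      if i = PySem.List.len class_rad_range - 1 then
        (acc.1 ++ [if class_type == "slope"
            then "$\\nabla$ > " ++ PySem.Int.toStr (PySem.List.pyGetD class_rad_range i 0) ++ "%"
            else "val > " ++ PySem.Int.toStr (PySem.List.pyGetD class_rad_range i 0) ++ "%"],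
         acc.2 ++ ["[" ++ PySem.Int.toStr (PySem.List.pyGetD class_rad_range i 0) ++ "; inf["])
      else
        (acc.1 ++ [if class_type == "slope"
            then "$\\nabla \\in$ [" ++ PySem.Int.toStr (PySem.List.pyGetD class_rad_range i 0) ++ "% ; " ++ PySem.Int.toStr (PySem.List.pyGetD class_rad_range (i + 1) 0) ++ "%]"
            else "val $\\in$ [" ++ PySem.Int.toStr (PySem.List.pyGetD class_rad_range i 0) ++ "% ; " ++ PySem.Int.toStr (PySem.List.pyGetD class_rad_range (i + 1) 0) ++ "%]"],
         acc.2 ++ ["[" ++ PySem.Int.toStr (PySem.List.pyGetD class_rad_range i 0) ++ "; " ++ PySem.Int.toStr (PySem.List.pyGetD class_rad_range (i + 1) 0) ++ "]"]))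
    ([], [])

-- ===== PORT B =====
-- literal port of Source B: right-to-left pass over the bounds carrying prev (Option Int);
-- prev = none emits the open-ended entry, otherwise the bounded entry for (a, prev);
-- both lists are appended back-to-front and reversed once at the end.
def pvStep (slope : Bool) (st : Option Int × List String × List String) (a : Int) : Option Int × List String × List String :=
  match st with
  | (none, labels, names) =>
      (some a,
       labels ++ [if slope then "$\\nabla$ > " ++ PySem.Int.toStr a ++ "%"
                  else "val > " ++ PySem.Int.toStr a ++ "%"],
       names ++ ["[" ++ PySem.Int.toStr a ++ "; inf["])
  | (some p, labels, names) =>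
      (some a,
       labels ++ [if slope
          then "$\\nabla \\in$ [" ++ PySem.Int.toStr a ++ "% ; " ++ PySem.Int.toStr p ++ "%]"
          else "val $\\in$ [" ++ PySem.Int.toStr a ++ "% ; " ++ PySem.Int.toStr p ++ "%]"],
       names ++ ["[" ++ PySem.Int.toStr a ++ "; " ++ PySem.Int.toStr p ++ "]"])

def get_sets_labels_and_names_alt (class_type : String) (class_rad_range : List Int) : List String × List String :=
  let slope := class_type == "slope"
  let st := class_rad_range.reverse.foldl (pvStep slope) (none, [], [])
  (st.2.1.reverse, st.2.2.reverse)

-- ===== PRECONDITION & SPEC =====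
def Spec_get_sets_labels_and_names (class_type : String) (class_rad_range : List Int) (out : List String × List String) : Prop := out = get_sets_labels_and_names_alt class_type class_rad_range
instance (class_type : String) (class_rad_range : List Int) (out : List String × List String) : Decidable (Spec_get_sets_labels_and_names class_type class_rad_range out) := by unfold Spec_get_sets_labels_and_names; infer_instance

-- ===== CLAIM (what is proved, stated in full; the proofs are below) =====
def Claim_equal_get_sets_labels_and_names : Prop := ∀ (class_type : String) (class_rad_range : List Int), Dom_get_sets_labels_and_names class_type class_rad_range → Spec_get_sets_labels_and_names class_type class_rad_range (get_sets_labels_and_names class_type class_rad_range)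

-- ===== LEMMAS AND PROOFS =====

theorem pv_ite_mk {α β : Type} (c : Prop) [Decidable c] (a₁ a₂ : α) (b₁ b₂ : β) :
    (if c then (a₁, b₁) else (a₂, b₂)) = ((if c then a₁ else a₂), (if c then b₁ else b₂)) := by
  split_ifs <;> rfl

theorem pv_ite_append {α : Type} (c : Prop) [Decidable c] (l : List α) (a b : α) :
    (if c then l ++ [a] else l ++ [b]) = l ++ [if c then a else b] := by
  split_ifs <;> rfl

-- A's per-index body (last-index test, xs[i]/xs[i+1] lookups) over range(len xs),
-- for xs = ys ++ [y], equals the pairwise map plus the tail entry.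
theorem pv_build_eq {α : Type} (ys : List Int) (y : Int) (pf : Int → Int → α) (tf : Int → α) :
    (List.range (ys ++ [y]).length).map
        (fun (k : Nat) => if (k : Int) = ((ys ++ [y]).length : Int) - 1
          then tf (PySem.List.pyGetD (ys ++ [y]) (k : Int) 0)
          else pf (PySem.List.pyGetD (ys ++ [y]) (k : Int) 0)
                  (PySem.List.pyGetD (ys ++ [y]) ((k : Int) + 1) 0))
      = ((ys ++ [y]).zip (ys ++ [y]).tail).map (fun p => pf p.1 p.2) ++ [tf y] := by
  apply List.ext_getElem
  · simp [List.length_zip]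
  · intro k h1 h2
    simp only [List.length_map, List.length_range] at h1
    have hzlen : (((ys ++ [y]).zip (ys ++ [y]).tail).map (fun p => pf p.1 p.2)).length = ys.length := by
      simp [List.length_zip]
    by_cases hk : k = ys.length
    · subst hk
      rw [List.getElem_map, List.getElem_range]
      rw [if_pos (by simp [List.length_append])]
      rw [PySem.List.pyGetD_natCast]
      rw [List.getElem_append_right (by omega)]
      simp [List.getD_eq_getElem?_getD]
    · have hklt : k < ys.length := by
        simp only [List.length_append, List.length_singleton] at h1; omega
      rw [List.getElem_map, List.getElem_range]
      rw [if_neg (by simp only [List.length_append, List.length_singleton]; push_cast; omega)]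
      rw [List.getElem_append_left (by omega)]
      have hcast : ((k : Int) + 1) = ((k + 1 : Nat) : Int) := by push_cast; ring
      rw [hcast, PySem.List.pyGetD_natCast, PySem.List.pyGetD_natCast]
      have hlen : k < (ys ++ [y]).length := by simp; omega
      have hlen1 : k + 1 < (ys ++ [y]).length := by simp; omega
      have hz : k < ((ys ++ [y]).zip (ys ++ [y]).tail).length := by simp [List.length_zip]; omega
      rw [List.getElem_map, List.getElem_zip]
      rw [List.getD_eq_getElem _ _ hlen, List.getD_eq_getElem _ _ hlen1, List.getElem_tail]

theorem pv_getLastD (l : List Int) (a p : Int) :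
    l.getLast?.getD a = (a :: l).getLast?.getD p := by
  induction l generalizing a p with
  | nil => simp
  | cons b l ih => rw [List.getLast?_cons_cons, ← ih b a, ← ih b p]

-- B's fold, once prev is set, appends one bounded entry per (current, prev) pair.
theorem pv_fold_some (slope : Bool) (l : List Int) (p : Int) (L N : List String) :
    l.foldl (pvStep slope) (some p, L, N) =
      (some (l.getLastD p),
       L ++ (l.zip (p :: l)).map
          (fun q => if slope
            then "$\\nabla \\in$ [" ++ PySem.Int.toStr q.1 ++ "% ; " ++ PySem.Int.toStr q.2 ++ "%]"
            else "val $\\in$ [" ++ PySem.Int.toStr q.1 ++ "% ; " ++ PySem.Int.toStr q.2 ++ "%]"),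
       N ++ (l.zip (p :: l)).map
          (fun q => "[" ++ PySem.Int.toStr q.1 ++ "; " ++ PySem.Int.toStr q.2 ++ "]")) := by
  induction l generalizing p L N with
  | nil => simp
  | cons a l ih =>
    simp [pvStep, ih]
    exact pv_getLastD l a p

-- reversing the reverse-order (current, prev) pairs gives the forward adjacent pairs.
theorem pv_rev_zip (ys : List Int) (y : Int) :
    (ys.reverse.zip (y :: ys.reverse)).reverse = (ys ++ [y]).zip ((ys ++ [y]).tail) := by
  apply List.ext_getElem
  · simp [List.length_zip]
  · intro k h1 h2
    simp only [List.length_reverse, List.length_zip, List.length_cons] at h1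
    have hk : k < ys.length := by omega
    simp only [List.getElem_reverse, List.getElem_zip, List.length_zip,
      List.length_reverse, List.length_cons, List.getElem_tail, Prod.mk.injEq]
    simp only [Nat.min_eq_left (by omega : ys.length ≤ ys.length + 1)]
    simp only [show ys.length - 1 - (ys.length - 1 - k) = k from by omega]
    constructor
    · rw [List.getElem_append_left (by omega)]
    · by_cases hlast : k + 1 = ys.length
      · simp only [show ys.length - 1 - k = 0 from by omega, List.getElem_cons_zero]
        rw [List.getElem_append_right (by omega)]
        simp
      · simp only [show ys.length - 1 - k = (ys.length - 2 - k) + 1 from by omega,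
          List.getElem_cons_succ, List.getElem_reverse]
        rw [List.getElem_append_left (by omega)]
        congr 1
        omega

-- B on a nonempty list ys ++ [y] computes exactly the pairwise map plus the tail entry.
theorem pv_alt_char (class_type : String) (ys : List Int) (y : Int) :
    get_sets_labels_and_names_alt class_type (ys ++ [y]) =
      (((ys ++ [y]).zip (ys ++ [y]).tail).map
          (fun p => if class_type == "slope"
            then "$\\nabla \\in$ [" ++ PySem.Int.toStr p.1 ++ "% ; " ++ PySem.Int.toStr p.2 ++ "%]"
            else "val $\\in$ [" ++ PySem.Int.toStr p.1 ++ "% ; " ++ PySem.Int.toStr p.2 ++ "%]")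
        ++ [if class_type == "slope" then "$\\nabla$ > " ++ PySem.Int.toStr y ++ "%"
            else "val > " ++ PySem.Int.toStr y ++ "%"],
       ((ys ++ [y]).zip (ys ++ [y]).tail).map
          (fun p => "[" ++ PySem.Int.toStr p.1 ++ "; " ++ PySem.Int.toStr p.2 ++ "]")
        ++ ["[" ++ PySem.Int.toStr y ++ "; inf["]) := by
  unfold get_sets_labels_and_names_alt
  rw [List.reverse_append]
  simp only [List.reverse_singleton, List.singleton_append, List.foldl_cons]
  have hstep : pvStep (class_type == "slope") (none, [], []) y =
      (some y,
       [if class_type == "slope" then "$\\nabla$ > " ++ PySem.Int.toStr y ++ "%"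
        else "val > " ++ PySem.Int.toStr y ++ "%"],
       ["[" ++ PySem.Int.toStr y ++ "; inf["]) := by
    simp [pvStep]
  rw [hstep, pv_fold_some]
  simp only [List.reverse_append, List.reverse_singleton, ← List.map_reverse, pv_rev_zip]

theorem pv_eq (class_type : String) (class_rad_range : List Int) :
    get_sets_labels_and_names class_type class_rad_range
      = get_sets_labels_and_names_alt class_type class_rad_range := by
  rcases List.eq_nil_or_concat class_rad_range with rfl | ⟨ys, y, rfl⟩
  · simp [get_sets_labels_and_names, get_sets_labels_and_names_alt]
  · simp only [List.concat_eq_append]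
    rw [pv_alt_char]
    unfold get_sets_labels_and_names
    rw [PySem.List.len_eq, PySem.List.pyRange_one]
    have hn : (((ys ++ [y]).length : Int) - 0).toNat = (ys ++ [y]).length := by omega
    rw [hn, List.foldl_map]
    simp only [pv_ite_mk, pv_ite_append]
    rw [PySem.List.foldl_prod_mk
      (f := fun (l : List String) (k : Nat) =>
        l ++ [if (0 + (k : Int)) = ((ys ++ [y]).length : Int) - 1 then
            (if class_type == "slope"
              then "$\\nabla$ > " ++ PySem.Int.toStr (PySem.List.pyGetD (ys ++ [y]) (0 + (k : Int)) 0) ++ "%"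
              else "val > " ++ PySem.Int.toStr (PySem.List.pyGetD (ys ++ [y]) (0 + (k : Int)) 0) ++ "%")
          else
            (if class_type == "slope"
              then "$\\nabla \\in$ [" ++ PySem.Int.toStr (PySem.List.pyGetD (ys ++ [y]) (0 + (k : Int)) 0) ++ "% ; " ++ PySem.Int.toStr (PySem.List.pyGetD (ys ++ [y]) ((0 + (k : Int)) + 1) 0) ++ "%]"
              else "val $\\in$ [" ++ PySem.Int.toStr (PySem.List.pyGetD (ys ++ [y]) (0 + (k : Int)) 0) ++ "% ; " ++ PySem.Int.toStr (PySem.List.pyGetD (ys ++ [y]) ((0 + (k : Int)) + 1) 0) ++ "%]")])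
      (g := fun (l : List String) (k : Nat) =>
        l ++ [if (0 + (k : Int)) = ((ys ++ [y]).length : Int) - 1 then
            "[" ++ PySem.Int.toStr (PySem.List.pyGetD (ys ++ [y]) (0 + (k : Int)) 0) ++ "; inf["
          else
            "[" ++ PySem.Int.toStr (PySem.List.pyGetD (ys ++ [y]) (0 + (k : Int)) 0) ++ "; " ++ PySem.Int.toStr (PySem.List.pyGetD (ys ++ [y]) ((0 + (k : Int)) + 1) 0) ++ "]"])]
    rw [PySem.List.foldl_append_singleton_eq_map, PySem.List.foldl_append_singleton_eq_map]
    simp only [zero_add, List.nil_append]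
    by_cases hct : class_type == "slope"
    · simp only [hct, if_true]
      refine Prod.ext ?_ ?_
      · exact pv_build_eq ys y
          (fun a b => "$\\nabla \\in$ [" ++ PySem.Int.toStr a ++ "% ; " ++ PySem.Int.toStr b ++ "%]")
          (fun a => "$\\nabla$ > " ++ PySem.Int.toStr a ++ "%")
      · exact pv_build_eq ys y
          (fun a b => "[" ++ PySem.Int.toStr a ++ "; " ++ PySem.Int.toStr b ++ "]")
          (fun a => "[" ++ PySem.Int.toStr a ++ "; inf[")
    · simp only [hct, if_false, Bool.false_eq_true]
      refine Prod.ext ?_ ?_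
      · exact pv_build_eq ys y
          (fun a b => "val $\\in$ [" ++ PySem.Int.toStr a ++ "% ; " ++ PySem.Int.toStr b ++ "%]")
          (fun a => "val > " ++ PySem.Int.toStr a ++ "%")
      · exact pv_build_eq ys y
          (fun a b => "[" ++ PySem.Int.toStr a ++ "; " ++ PySem.Int.toStr b ++ "]")
          (fun a => "[" ++ PySem.Int.toStr a ++ "; inf[")

-- ===== VERDICT (by name: the statement is the Claim_ definition above) =====
theorem get_sets_labels_and_names_spec : Claim_equal_get_sets_labels_and_names := by
  intro class_type class_rad_range _
  exact pv_eq class_type class_rad_range
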